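-- pv_equiv track=rewrite | github.com/DevHub-iLab/Advent-of-Code-2024 | coziyu/day25/day25.py | to_height
-- ===== SOURCE A (Python) =====
-- def to_height(item):
--     out = []
--     for i in range(len(item[0])):
--         sum = 0
--         for j in range(len(item)):
--             if item[j][i] == "#":
--                 sum += 1
--         out.append(sum)
--     return out
-- ===== SOURCE B (Python) =====
-- def to_height(item):
--     # Fold elementwise vector addition: each row is an indicator vector,
--     # paired with the running totals by zip (no index arithmetic at all).
--     out = [0] * len(item[0])
--     for row in item:
--         out = [a + (c == "#") for a, c in zip(out, row)]
--     return out
-- ===== Notes on version B (the rewrite author's own statement) =====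
-- stated objective: alternative
-- what changed: B treats each row as an indicator vector and folds elementwise vector addition over the rows, pairing totals with characters by zip in a comprehension (no index arithmetic, a fresh list per row), instead of A's per-column rescans of all rows with explicit i/j indexing.
import Mathlib
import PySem

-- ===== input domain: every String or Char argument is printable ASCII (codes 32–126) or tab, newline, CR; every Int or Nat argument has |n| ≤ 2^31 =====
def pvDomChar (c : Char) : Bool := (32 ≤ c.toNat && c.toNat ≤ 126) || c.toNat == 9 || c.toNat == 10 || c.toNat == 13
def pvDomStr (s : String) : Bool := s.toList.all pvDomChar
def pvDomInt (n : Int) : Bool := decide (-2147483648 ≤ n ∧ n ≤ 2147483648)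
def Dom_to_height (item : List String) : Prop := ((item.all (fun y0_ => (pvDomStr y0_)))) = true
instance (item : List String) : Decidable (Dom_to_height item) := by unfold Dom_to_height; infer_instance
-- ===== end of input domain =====

-- B folds elementwise vector addition of per-row indicator vectors (zip pairing, no
-- index arithmetic) instead of A's per-column rescans of all rows (alternative, same cost).


-- ===== PORT A =====
-- for i in range(len(item[0])): sum over j of item[j][i] == "#"; out.append(sum).
-- item[0] on [] and item[j][i] out of range raise IndexError in Python: those inputs are
-- excluded by Pre_, so the defaults "" / ' ' used here are never reached under Pre_.
def to_height (item : List String) : List Int :=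
  (PySem.List.pyRange 0 (PySem.Str.len (item.headD ""))).foldl
    (fun out i =>
      let sum : Int := (PySem.List.pyRange 0 (PySem.List.len item)).foldl
        (fun sum j =>
          if (PySem.Str.pyGet? (PySem.List.pyGetD item j "") i).getD ' ' == '#' then sum + 1
          else sum)
        0
      out ++ [sum]) []

-- ===== PORT B =====
-- out = [0]*len(item[0]); fold over rows: out = [a + (c=="#") for a,c in zip(out,row)].
def to_height_alt (item : List String) : List Int :=
  let width : Int := PySem.Str.len (item.headD "")
  item.foldl
    (fun out row =>
      (out.zip row.toList).map (fun p => p.1 + (if p.2 == '#' then (1 : Int) else 0)))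
    (List.replicate width.toNat 0)

-- ===== PRECONDITION & SPEC =====
-- Pre_ excludes exactly the inputs where the Python A raises IndexError: the empty grid
-- (item[0]) and grids with a row shorter than the first row (item[j][i]).
def Pre_to_height (item : List String) : Prop :=
  item ≠ [] ∧ ∀ s ∈ item, PySem.Str.len (item.headD "") ≤ PySem.Str.len s
instance (item : List String) : Decidable (Pre_to_height item) := by
  unfold Pre_to_height; infer_instance
def pvWitness_to_height : List String := ["#.", "##", ".."]
def Spec_to_height (item : List String) (out : List Int) : Prop := out = to_height_alt item
instance (item : List String) (out : List Int) : Decidable (Spec_to_height item out) := by unfold Spec_to_height; infer_instance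

-- ===== CLAIM (what is proved, stated in full; the proofs are below) =====
def Claim_equal_to_height : Prop := ∀ (item : List String), Dom_to_height item → Pre_to_height item → Spec_to_height item (to_height item)

-- ===== LEMMAS AND PROOFS =====

-- the character test both Pythons perform at row `row`, column `i`
def pvInd (row : String) (i : Int) : Bool := (PySem.Str.pyGet? row i).getD ' ' == '#'

-- A appends, per column k, the count of rows whose k-th char is '#'
lemma to_height_eq_map (item : List String) :
    to_height item = (List.range (item.headD "").toList.length).map
      (fun (k : Nat) => ((item.countP (fun row => pvInd row (k : Int))) : Int)) := by
  unfold to_height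
  rw [PySem.Str.len_eq, PySem.List.pyRange_zero_natCast, List.foldl_map]
  rw [PySem.List.foldl_append_singleton_eq_map
        (f := fun (k : Nat) => (PySem.List.pyRange 0 (PySem.List.len item)).foldl
          (fun sum j =>
            if (PySem.Str.pyGet? (PySem.List.pyGetD item j "") (k : Int)).getD ' ' == '#'
            then sum + 1 else sum) (0 : Int))]
  simp only [List.nil_append]
  refine List.map_congr_left ?_
  intro k hk
  rw [PySem.List.foldl_pyRange_pyGetD item ""
        (f := fun (sum : Int) (row : String) =>
          if (PySem.Str.pyGet? row (k : Int)).getD ' ' == '#' then sum + 1 else sum)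
        (0 : Int) le_rfl]
  simp only [Int.toNat_zero, List.drop_zero]
  have h := PySem.List.foldl_if_add_one (fun row => pvInd row (k : Int)) item 0
  simp only [pvInd] at h
  simpa [pvInd] using h

-- one step of B's fold
def pvZipStep (o : List Int) (r : String) : List Int :=
  (o.zip r.toList).map (fun p => p.1 + (if p.2 == '#' then (1 : Int) else 0))

lemma pvZipStep_length (o : List Int) (r : String) (h : o.length ≤ r.toList.length) :
    (pvZipStep o r).length = o.length := by
  have h' : o.length ≤ r.length := by simpa using h
  simp [pvZipStep, Nat.min_eq_left h']

lemma pvZipStep_getD (o : List Int) (r : String) (k : Nat) (hk : k < o.length)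
    (h : o.length ≤ r.toList.length) :
    (pvZipStep o r).getD k 0 =
      o.getD k 0 + (if pvInd r (k : Int) = true then (1 : Int) else 0) := by
  have hkr : k < r.toList.length := lt_of_lt_of_le hk h
  have h' : o.length ≤ r.length := by simpa using h
  rw [List.getD_eq_getElem _ _ (by rw [pvZipStep_length o r h]; exact hk),
      List.getD_eq_getElem _ _ hk]
  simp [pvZipStep, pvInd, List.getElem?_eq_getElem hkr]

lemma zipfold_length (rows : List String) (w : Nat) (h : ∀ r ∈ rows, w ≤ r.toList.length) :
    ∀ (o : List Int), o.length = w → (rows.foldl pvZipStep o).length = w := by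
  induction rows with
  | nil => intro o ho; exact ho
  | cons r t ih =>
    intro o ho
    rw [List.foldl_cons]
    exact ih (fun s hs => h s (List.mem_cons_of_mem _ hs)) _
      (by rw [pvZipStep_length o r (ho ▸ h r List.mem_cons_self)]; exact ho)

lemma zipfold_getD (rows : List String) (w : Nat) (h : ∀ r ∈ rows, w ≤ r.toList.length) :
    ∀ (o : List Int) (_ : o.length = w) (k : Nat), k < w →
      (rows.foldl pvZipStep o).getD k 0 =
        o.getD k 0 + ((rows.countP (fun r => pvInd r (k : Int))) : Int) := by
  induction rows with
  | nil => intro o ho k hk; simp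
  | cons r t ih =>
    intro o ho k hk
    have hr : w ≤ r.toList.length := h r List.mem_cons_self
    have ht : ∀ s ∈ t, w ≤ s.toList.length := fun s hs => h s (List.mem_cons_of_mem _ hs)
    have hlen : (pvZipStep o r).length = w := by
      rw [pvZipStep_length o r (ho ▸ hr)]; exact ho
    rw [List.foldl_cons, ih ht _ hlen k hk,
        pvZipStep_getD o r k (by omega) (ho ▸ hr), List.countP_cons]
    by_cases hp : pvInd r (k : Int) = true
    · simp [hp]; ring
    · simp [hp]

-- B is the pvZipStep fold
lemma to_height_alt_eq (item : List String) :
    to_height_alt item = item.foldl pvZipStep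
      (List.replicate (item.headD "").toList.length 0) := by
  unfold to_height_alt pvZipStep
  rw [PySem.Str.len_eq]
  rfl

-- ===== VERDICT (by name: the statement is the Claim_ definition above) =====
theorem to_height_spec : Claim_equal_to_height := by
  intro item _ hpre
  unfold Spec_to_height
  obtain ⟨-, hrows⟩ := hpre
  have hrows' : ∀ r ∈ item, (item.headD "").toList.length ≤ r.toList.length := by
    intro r hr
    have := hrows r hr
    simpa [PySem.Str.len_eq] using this
  rw [to_height_eq_map, to_height_alt_eq]
  have hlen : (item.foldl pvZipStep
      (List.replicate (item.headD "").toList.length 0)).length =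
      (item.headD "").toList.length :=
    zipfold_length item _ hrows' _ (List.length_replicate)
  apply List.ext_getElem
  · rw [List.length_map, List.length_range, hlen]
  · intro k h1 h2
    have hkw : k < (item.headD "").toList.length := by rwa [hlen] at h2
    rw [List.getElem_map, List.getElem_range, ← List.getD_eq_getElem _ 0 h2,
        zipfold_getD item _ hrows' _ (List.length_replicate) k hkw]
    simp
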